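-- pv_equiv track=rewrite | github.com/15321020108-a11y/Homework | w2/week_2.py | count_bigrams
-- ===== SOURCE A (Python) =====
-- from collections import Counter
--
-- MIN_WORD_LENGTH = 2
--
-- def is_valid_word(word: str, stopwords: set[str] | None = None) -> bool:
--     if len(word) < MIN_WORD_LENGTH:
--         return False
--     if word.isdigit():
--         return False
--     if stopwords and word in stopwords:
--         return False
--     return True
--
-- def count_bigrams(tokenized_documents: list[list[str]], stopwords: set[str]) -> Counter[tuple[str, str]]:
--     bigram_counter: Counter[tuple[str, str]] = Counter()
--     for words in tokenized_documents:
--         filtered_words = [word for word in words if is_valid_word(word, stopwords)]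
--         for i in range(len(filtered_words) - 1):
--             bigram = (filtered_words[i], filtered_words[i + 1])
--             bigram_counter[bigram] += 1
--     return bigram_counter
-- ===== SOURCE B (Python) =====
-- from collections import Counter
--
-- MIN_WORD_LENGTH = 2
--
--
-- def _valid(word, stopwords):
--     return (len(word) >= MIN_WORD_LENGTH
--             and not word.isdigit()
--             and not (stopwords and word in stopwords))
--
--
-- def count_bigrams(tokenized_documents, stopwords):
--     bigram_counter = Counter()
--     for words in tokenized_documents:
--         prev = None
--         for word in words:
--             if _valid(word, stopwords):
--                 if prev is not None:
--                     bigram_counter[(prev, word)] += 1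
--                 prev = word
--     return bigram_counter
-- ===== Notes on version B (the rewrite author's own statement) =====
-- stated objective: simpler
-- what changed: Replaces the two-phase per-document pipeline (build a filtered_words list, then index it pairwise over range(len-1)) with a single streaming pass that keeps only the previous valid word in a prev variable, reset at each document's start.
import Mathlib
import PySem

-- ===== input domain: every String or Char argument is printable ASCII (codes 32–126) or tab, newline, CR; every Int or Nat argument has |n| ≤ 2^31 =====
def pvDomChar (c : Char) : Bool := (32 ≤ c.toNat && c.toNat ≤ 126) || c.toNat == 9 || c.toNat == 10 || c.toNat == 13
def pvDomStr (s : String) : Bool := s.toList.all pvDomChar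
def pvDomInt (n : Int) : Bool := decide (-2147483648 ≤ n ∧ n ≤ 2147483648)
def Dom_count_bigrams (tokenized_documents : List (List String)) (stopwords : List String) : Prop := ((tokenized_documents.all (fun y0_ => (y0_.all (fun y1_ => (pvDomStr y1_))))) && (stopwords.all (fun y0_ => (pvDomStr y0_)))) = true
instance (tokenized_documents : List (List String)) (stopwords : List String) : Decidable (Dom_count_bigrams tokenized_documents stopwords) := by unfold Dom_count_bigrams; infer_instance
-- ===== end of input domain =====

-- B replaces A's per-document filter-then-index-pairwise pipeline with a single streaming
-- pass that keeps only the previous valid word (reset per document); same counts, same order.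


-- ===== PORT A =====
-- is_valid_word with A's early-return chain kept as nested ifs ('if stopwords' = nonempty)
def is_valid_word (word : String) (stopwords : List String) : Bool :=
  if PySem.Str.len word < 2 then false
  else if PySem.Str.strIsdigit word then false
  else if !stopwords.isEmpty && stopwords.contains word then false
  else true

def count_bigrams (tokenized_documents : List (List String)) (stopwords : List String) : List (String × String × Int) :=
  let bigram_counter : PySem.Dict (String × String) Int :=
    tokenized_documents.foldl (fun bc words =>
      let filtered_words := words.filter (fun word => is_valid_word word stopwords)
      (PySem.List.pyRange 0 (PySem.List.len filtered_words - 1) 1).foldl (fun bc i =>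
        let bigram := (PySem.List.pyGetD filtered_words i "", PySem.List.pyGetD filtered_words (i + 1) "")
        bc.modify bigram 0 (· + 1)) bc) PySem.Dict.empty
  bigram_counter.items.map (fun p => (p.1.1, p.1.2, p.2))

-- ===== PORT B =====
def valid_alt (word : String) (stopwords : List String) : Bool :=
  2 ≤ PySem.Str.len word && !PySem.Str.strIsdigit word
    && !(!stopwords.isEmpty && stopwords.contains word)

def count_bigrams_alt (tokenized_documents : List (List String)) (stopwords : List String) : List (String × String × Int) :=
  let bigram_counter : PySem.Dict (String × String) Int :=
    tokenized_documents.foldl (fun bc words =>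
      (words.foldl (fun (st : PySem.Dict (String × String) Int × Option String) word =>
        if valid_alt word stopwords then
          (match st.2 with
           | some prev => st.1.modify (prev, word) 0 (· + 1)
           | none => st.1, some word)
        else st) (bc, none)).1) PySem.Dict.empty
  bigram_counter.items.map (fun p => (p.1.1, p.1.2, p.2))

-- ===== PRECONDITION & SPEC =====
def Spec_count_bigrams (tokenized_documents : List (List String)) (stopwords : List String) (out : List (String × String × Int)) : Prop := out = count_bigrams_alt tokenized_documents stopwords
instance (tokenized_documents : List (List String)) (stopwords : List String) (out : List (String × String × Int)) : Decidable (Spec_count_bigrams tokenized_documents stopwords out) := by unfold Spec_count_bigrams; infer_instance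

-- ===== CLAIM (what is proved, stated in full; the proofs are below) =====
def Claim_equal_count_bigrams : Prop := ∀ (tokenized_documents : List (List String)) (stopwords : List String), Dom_count_bigrams tokenized_documents stopwords → Spec_count_bigrams tokenized_documents stopwords (count_bigrams tokenized_documents stopwords)

-- ===== LEMMAS AND PROOFS =====

-- the two validity tests agree
theorem valid_eq (word : String) (stopwords : List String) :
    is_valid_word word stopwords = valid_alt word stopwords := by
  have hlen : word.toList.length = word.length := by simp
  unfold is_valid_word valid_alt
  split_ifs with h1 h2 h3
  · simp only [PySem.Str.len_eq] at h1 ⊢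
    simp
    intro h
    omega
  · simp_all
  · simp_all
  · simp only [PySem.Str.len_eq] at h1 ⊢
    simp_all
    exact ⟨by omega, by tauto⟩

-- shorthand for the counting step
def inc (bc : PySem.Dict (String × String) Int) (p : String × String) :
    PySem.Dict (String × String) Int := bc.modify p 0 (· + 1)

-- Nat-index form of A's per-document loop counts the adjacent pairs of the filtered list
theorem natLoop_eq_zip (f : List String) (bc : PySem.Dict (String × String) Int) :
    (List.range (f.length - 1)).foldl (fun bc k => inc bc (f.getD k "", f.getD (k + 1) "")) bc
      = (f.zip f.tail).foldl inc bc := by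
  induction f generalizing bc with
  | nil => simp
  | cons x t ih =>
    cases t with
    | nil => simp
    | cons y t' =>
      simp only [List.length_cons, Nat.add_sub_cancel, List.range_succ_eq_map,
        List.foldl_cons, List.foldl_map, List.getD_cons_zero, List.getD_cons_succ,
        List.zip_cons_cons, List.tail_cons]
      have := ih (inc bc (x, y))
      simpa [List.getD_cons_succ] using this

-- A's per-document index loop counts exactly the adjacent pairs of the filtered list
theorem indexLoop_eq_zip (f : List String) (bc : PySem.Dict (String × String) Int) :
    (PySem.List.pyRange 0 (PySem.List.len f - 1) 1).foldl (fun bc i =>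
        inc bc (PySem.List.pyGetD f i "", PySem.List.pyGetD f (i + 1) "")) bc
      = (f.zip f.tail).foldl inc bc := by
  cases f with
  | nil => simp [PySem.List.pyRange_one_eq_nil, PySem.List.len]
  | cons x t =>
    have hlen : PySem.List.len (x :: t) - 1 = ((t.length : Int)) := by
      simp [PySem.List.len]
    rw [hlen, PySem.List.pyRange_zero_nat, List.foldl_map]
    have hfun : (List.range t.length).foldl (fun bc (k : Nat) =>
        inc bc (PySem.List.pyGetD (x :: t) (↑k) "", PySem.List.pyGetD (x :: t) (↑k + 1) "")) bc
      = (List.range t.length).foldl (fun bc k =>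
        inc bc ((x :: t).getD k "", (x :: t).getD (k + 1) "")) bc := by
      refine PySem.List.foldl_congr_mem _ _ _ _ (fun bc k _ => ?_)
      have h1 : ((k : Int) + 1) = ((k + 1 : Nat) : Int) := by push_cast; ring
      rw [h1, PySem.List.pyGetD_natCast, PySem.List.pyGetD_natCast]
    rw [hfun]
    have h2 : t.length = (x :: t).length - 1 := by simp
    rw [h2, natLoop_eq_zip]

-- pairs counted by B's streaming pass given a pending previous valid word
def pairsP (prev : Option String) (l : List String) : List (String × String) :=
  match prev with
  | none => l.zip l.tail
  | some p => (p :: l).zip l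

-- B's per-document streaming pass counts exactly pairsP of the filtered list
theorem stream_eq_zip (ws : List String) (stopwords : List String)
    (bc : PySem.Dict (String × String) Int) (prev : Option String) :
    (ws.foldl (fun (st : PySem.Dict (String × String) Int × Option String) word =>
        if valid_alt word stopwords then
          (match st.2 with
           | some p => inc st.1 (p, word)
           | none => st.1, some word)
        else st) (bc, prev)).1
      = (pairsP prev (ws.filter (fun w => valid_alt w stopwords))).foldl inc bc := by
  induction ws generalizing bc prev with
  | nil => cases prev <;> simp [pairsP]
  | cons w ws ih =>
    by_cases hv : valid_alt w stopwords
    · cases prev <;> simp [hv, ih, pairsP]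
    · simp [hv, ih]

-- ===== VERDICT (by name: the statement is the Claim_ definition above) =====
theorem count_bigrams_spec : Claim_equal_count_bigrams := by
  intro docs stopwords _
  unfold Spec_count_bigrams count_bigrams count_bigrams_alt
  simp only []
  congr 2
  refine PySem.List.foldl_congr_mem _ _ _ _ (fun bc words _ => ?_)
  have hfil : words.filter (fun w => is_valid_word w stopwords)
      = words.filter (fun w => valid_alt w stopwords) :=
    List.filter_congr (fun w _ => valid_eq w stopwords)
  have hA := indexLoop_eq_zip (words.filter (fun w => is_valid_word w stopwords)) bc
  have hB := stream_eq_zip words stopwords bc none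
  simp only [inc] at hA hB
  simpa [hfil, pairsP] using hA.trans (by rw [hfil]; exact hB.symm)
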